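-- pv_equiv track=rewrite | github.com/aawiegel/zen_bronze_data | notebooks/presentation_demo.py | clean_columns
-- ===== SOURCE A (Python) =====
-- def clean_columns(records: list) -> list:
--     """Remove empty columns and deduplicate column names"""
--     header = records[0]
--     # Find non-empty columns and deduplicate names
--     seen = {}
--     indices_to_keep = []
--     for i, col in enumerate(header):
--         if col:  # Non-empty
--             if col in seen:
--                 seen[col] += 1
--                 indices_to_keep.append((i, f"{col}_{seen[col]}"))
--             else:
--                 seen[col] = 0
--                 indices_to_keep.append((i, col))
--
--     # Rebuild records with only kept columns
--     cleaned = []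
--     for row in records:
--         cleaned.append([row[i] for i, _ in indices_to_keep])
--     cleaned[0] = [name for _, name in indices_to_keep]  # Update header
--     return cleaned
-- ===== SOURCE B (Python) =====
-- def clean_columns(records: list) -> list:
--     """Remove empty columns and deduplicate column names"""
--     header = records[0]
--     seen = {}
--     indices = []
--     names = []
--     for i, col in enumerate(header):
--         if col:
--             if col in seen:
--                 seen[col] += 1
--                 indices.append(i)
--                 names.append(f"{col}_{seen[col]}")
--             else:
--                 seen[col] = 0
--                 indices.append(i)
--                 names.append(col)
--     # build column-major, then transpose back to rows
--     columns = [[row[i] for row in records] for i in indices]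
--     if indices:
--         body = [list(r) for r in zip(*columns)][1:]
--     else:
--         body = [[] for _ in records[1:]]
--     return [names] + body
-- ===== Notes on version B (the rewrite author's own statement) =====
-- stated objective: alternative
-- what changed: B keeps the header pass but rebuilds the table column-major: it extracts each kept column in full and transposes the columns back into rows via zip(*columns), instead of A's row-by-row projection.
import Mathlib
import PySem

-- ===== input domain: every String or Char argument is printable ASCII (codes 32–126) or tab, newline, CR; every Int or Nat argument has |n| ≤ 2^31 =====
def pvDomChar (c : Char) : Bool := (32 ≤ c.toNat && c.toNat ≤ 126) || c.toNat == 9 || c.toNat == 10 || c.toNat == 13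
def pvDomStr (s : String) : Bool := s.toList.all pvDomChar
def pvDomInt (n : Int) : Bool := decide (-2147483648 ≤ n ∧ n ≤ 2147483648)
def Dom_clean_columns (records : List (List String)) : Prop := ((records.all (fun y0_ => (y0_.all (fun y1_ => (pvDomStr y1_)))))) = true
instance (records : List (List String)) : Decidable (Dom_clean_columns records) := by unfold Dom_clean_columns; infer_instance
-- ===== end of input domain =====

-- B rebuilds the table column-major (extract kept columns, then transpose) instead of A's
-- row-major rebuild; alternative decomposition, same cost.

-- ===== PORT A =====
-- step of A's first loop: state = (seen dict, indices_to_keep as (index, name) pairs)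
def cleanStepA (st : PySem.Dict String Int × List (Int × String)) (p : Int × String) :
    PySem.Dict String Int × List (Int × String) :=
  if p.2 ≠ "" then
    match st.1.get? p.2 with
    | some n => (st.1.insert p.2 (n + 1), st.2 ++ [(p.1, p.2 ++ "_" ++ PySem.Int.toStr (n + 1))])
    | none   => (st.1.insert p.2 0, st.2 ++ [(p.1, p.2)])
  else st

def clean_columns (records : List (List String)) : List (List String) :=
  let header := records.headD []
  let keep := ((PySem.List.enumerate header 0).foldl cleanStepA (PySem.Dict.empty, [])).2
  let cleaned := records.map (fun row => keep.map (fun p => PySem.List.pyGetD row p.1 ""))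
  cleaned.set 0 (keep.map (·.2))

-- ===== PORT B =====
-- step of B's first loop: state = (seen dict, kept indices, deduplicated names)
def cleanStepB (st : PySem.Dict String Int × List Int × List String) (p : Int × String) :
    PySem.Dict String Int × List Int × List String :=
  if p.2 ≠ "" then
    match st.1.get? p.2 with
    | some n => (st.1.insert p.2 (n + 1), st.2.1 ++ [p.1], st.2.2 ++ [p.2 ++ "_" ++ PySem.Int.toStr (n + 1)])
    | none   => (st.1.insert p.2 0, st.2.1 ++ [p.1], st.2.2 ++ [p.2])
  else st

-- zip(*columns): rows of heads until some column is exhausted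
def zipStar (cols : List (List String)) : List (List String) :=
  if h : cols = [] ∨ cols.any (·.isEmpty) then []
  else (cols.map (fun c => c.headD "")) :: zipStar (cols.map (fun c => c.tail))
termination_by (cols.headD []).length
decreasing_by
  rw [not_or] at h
  obtain ⟨h1, h2⟩ := h
  cases cols with
  | nil => exact absurd rfl h1
  | cons c rest =>
    simp only [List.any_cons, Bool.or_eq_true, not_or, List.isEmpty_iff] at h2
    simp only [List.attach_cons, List.map_cons, List.headD_cons, List.length_tail]
    have := List.length_pos_iff.mpr h2.1
    omega

def clean_columns_alt (records : List (List String)) : List (List String) :=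
  let header := records.headD []
  let st := (PySem.List.enumerate header 0).foldl cleanStepB (PySem.Dict.empty, [], [])
  let indices := st.2.1
  let names := st.2.2
  let columns := indices.map (fun i => records.map (fun row => PySem.List.pyGetD row i ""))
  let body := if indices ≠ [] then (zipStar columns).tail
              else records.tail.map (fun _ => ([] : List String))
  names :: body

-- ===== PRECONDITION & SPEC =====
-- Pre_ excludes exactly the inputs where Python A raises: the empty record list (records[0]
-- is an IndexError) and ragged rows missing a kept (non-empty-header) column index.
def Pre_clean_columns (records : List (List String)) : Prop :=
  records ≠ [] ∧
  ∀ row ∈ records, ∀ k : Nat, k < (records.headD []).length →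
    (records.headD []).getD k "" ≠ "" → k < row.length
instance (records : List (List String)) : Decidable (Pre_clean_columns records) := by
  unfold Pre_clean_columns; infer_instance

def pvWitness_clean_columns : List (List String) := [["a", "", "a"], ["1", "2", "3"]]

def Spec_clean_columns (records : List (List String)) (out : List (List String)) : Prop := out = clean_columns_alt records
instance (records : List (List String)) (out : List (List String)) : Decidable (Spec_clean_columns records out) := by unfold Spec_clean_columns; infer_instance

-- ===== CLAIM (what is proved, stated in full; the proofs are below) =====
def Claim_equal_clean_columns : Prop := ∀ (records : List (List String)), Dom_clean_columns records → Pre_clean_columns records → Spec_clean_columns records (clean_columns records)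

-- ===== LEMMAS AND PROOFS =====

-- the two first passes compute the same data: A's pair list is the zip of B's two lists
theorem pass_eq (l : List (Int × String)) (d : PySem.Dict String Int)
    (idx : List Int) (names : List String) (hlen : idx.length = names.length) :
    l.foldl cleanStepA (d, idx.zip names)
      = ((l.foldl cleanStepB (d, idx, names)).1,
         (l.foldl cleanStepB (d, idx, names)).2.1.zip (l.foldl cleanStepB (d, idx, names)).2.2)
    ∧ (l.foldl cleanStepB (d, idx, names)).2.1.length
        = (l.foldl cleanStepB (d, idx, names)).2.2.length := by
  induction l generalizing d idx names with
  | nil => exact ⟨rfl, hlen⟩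
  | cons p rest ih =>
    simp only [List.foldl_cons, cleanStepA, cleanStepB]
    split_ifs with hc
    · cases hg : d.get? p.2 with
      | some n =>
        dsimp only
        have hz : idx.zip names ++ [(p.1, p.2 ++ "_" ++ PySem.Int.toStr (n + 1))]
            = (idx ++ [p.1]).zip (names ++ [p.2 ++ "_" ++ PySem.Int.toStr (n + 1)]) := by
          rw [List.zip_append hlen]
          rfl
        rw [hz]
        exact ih _ _ _ (by simp [hlen])
      | none =>
        dsimp only
        have hz : idx.zip names ++ [(p.1, p.2)] = (idx ++ [p.1]).zip (names ++ [p.2]) := by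
          rw [List.zip_append hlen]
          rfl
        rw [hz]
        exact ih _ _ _ (by simp [hlen])
    · exact ih _ _ _ hlen

-- transposing the extracted columns gives back the row-major selection
theorem zipStar_cols (idxs : List Int) (rows : List (List String)) (hne : idxs ≠ []) :
    zipStar (idxs.map (fun i => rows.map (fun row => PySem.List.pyGetD row i "")))
      = rows.map (fun row => idxs.map (fun i => PySem.List.pyGetD row i "")) := by
  induction rows with
  | nil =>
    obtain ⟨j, jrest, rfl⟩ : ∃ j jrest, idxs = j :: jrest := by
      cases idxs with
      | nil => exact absurd rfl hne
      | cons a b => exact ⟨a, b, rfl⟩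
    rw [zipStar, dif_pos (by simp)]
    simp
  | cons r rest ih =>
    rw [zipStar, dif_neg]
    · have htail : ((idxs.map (fun i => (r :: rest).map (fun row => PySem.List.pyGetD row i ""))).map
          (fun c => c.tail))
          = idxs.map (fun i => rest.map (fun row => PySem.List.pyGetD row i "")) := by
        rw [List.map_map]
        rfl
      have hhead : ((idxs.map (fun i => (r :: rest).map (fun row => PySem.List.pyGetD row i ""))).map
          (fun c => c.headD ""))
          = idxs.map (fun i => PySem.List.pyGetD r i "") := by
        rw [List.map_map]
        rfl
      rw [htail, hhead, ih, List.map_cons]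
    · rw [not_or]
      constructor
      · simp only [List.map_eq_nil_iff]
        exact hne
      · simp [List.any_map, Function.comp]

theorem clean_columns_spec : Claim_equal_clean_columns := by
  intro records _ hpre
  obtain ⟨hne, _⟩ := hpre
  unfold Spec_clean_columns clean_columns clean_columns_alt
  obtain ⟨r0, rest, rfl⟩ : ∃ r0 rest, records = r0 :: rest := by
    cases records with
    | nil => exact absurd rfl hne
    | cons a b => exact ⟨a, b, rfl⟩
  simp only [List.headD_cons]
  have h := pass_eq (PySem.List.enumerate r0 0) PySem.Dict.empty [] [] rfl
  set stB := (PySem.List.enumerate r0 0).foldl cleanStepB (PySem.Dict.empty, [], []) with hstB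
  have hkeep : ((PySem.List.enumerate r0 0).foldl cleanStepA (PySem.Dict.empty, [])).2
      = stB.2.1.zip stB.2.2 := by
    rw [show (PySem.Dict.empty, ([] : List (Int × String)))
        = (PySem.Dict.empty, ([] : List Int).zip ([] : List String)) from rfl, h.1]
  have hlen : stB.2.1.length = stB.2.2.length := h.2
  rw [hkeep]
  have hmap1 : ∀ row, (stB.2.1.zip stB.2.2).map (fun p => PySem.List.pyGetD row p.1 "")
      = stB.2.1.map (fun i => PySem.List.pyGetD row i "") := by
    intro row
    rw [show (fun p : Int × String => PySem.List.pyGetD row p.1 "")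
        = (fun i => PySem.List.pyGetD row i "") ∘ Prod.fst from rfl, ← List.map_map]
    congr 1
    exact List.map_fst_zip (by omega)
  have hmap2 : (stB.2.1.zip stB.2.2).map (·.2) = stB.2.2 :=
    List.map_snd_zip (by omega)
  by_cases hidx : stB.2.1 ≠ []
  · rw [if_pos hidx, zipStar_cols stB.2.1 (r0 :: rest) hidx]
    simp only [List.map_cons, List.set_cons_zero, List.tail_cons, hmap1, hmap2]
  · rw [if_neg hidx]
    push Not at hidx
    have hnames : stB.2.2 = [] := List.eq_nil_of_length_eq_zero (by rw [← hlen, hidx]; rfl)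
    simp [hidx, hnames]
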